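-- pv_equiv track=rewrite | github.com/lyoubo/feTruth | implementation/feTruth_with_randomly_generated_data/process.py | preprocessing_names
-- ===== SOURCE A (Python) =====
-- MAX_NUM_WORD = 5
--
-- def participle(name):
--     for ch in name:
--         if ch.isupper():
--             name = name.replace(ch, ' ' + ch.lower(), 1)
--         else:
--             if ch == '_' or ch == '$':
--                 name = name.replace(ch, ' ', 1)
--             else:
--                 if ch.isdigit():
--                     name = name.replace(ch, ' ' + ch)
--     name1 = name.strip().split(' ')
--     sentence = []
--     for word in name1:
--         if word != '':
--             sentence.append(word)
--     return sentence
--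
-- def preprocessing_names(sentence):
--     sentence = participle(sentence)
--     num = len(sentence)
--     sentence1 = ''
--     if num < MAX_NUM_WORD:
--         for i in range(MAX_NUM_WORD - num):
--             sentence1 += '*' + ' '
--         sentence1 = sentence1.strip().split(' ')
--         sentence1 += sentence
--     if num > MAX_NUM_WORD:
--         num = MAX_NUM_WORD
--         num1 = MAX_NUM_WORD
--         sentence1 = ''
--         for word in sentence:
--             if num1 == MAX_NUM_WORD:
--                 sentence1 += word
--             else:
--                 sentence1 += ' ' + word
--             num1 = num1 - 1
--             if num1 == 0:
--                 break
--         sentence = sentence1.strip().split(' ')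
--     if num == MAX_NUM_WORD:
--         sentence1 = sentence
--     return sentence1
-- ===== SOURCE B (Python) =====
-- MAX_NUM_WORD = 5
--
-- # one-pass per-character transform table: uppercase -> ' '+lower, '_'/'$' -> ' ', digit -> ' '+digit
-- _TABLE = {ord(c): ' ' + c.lower() for c in 'ABCDEFGHIJKLMNOPQRSTUVWXYZ'}
-- _TABLE[ord('_')] = ' '
-- _TABLE[ord('$')] = ' '
-- for _d in '0123456789':
--     _TABLE[ord(_d)] = ' ' + _d
--
-- def preprocessing_names(sentence):
--     words = [w for w in sentence.translate(_TABLE).strip().split(' ') if w]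
--     n = len(words)
--     if n < MAX_NUM_WORD:
--         return ['*'] * (MAX_NUM_WORD - n) + words
--     if n > MAX_NUM_WORD:
--         return ' '.join(words[:MAX_NUM_WORD]).strip().split(' ')
--     return words
-- ===== Notes on version B (the rewrite author's own statement) =====
-- stated objective: faster
-- what changed: B replaces A's per-character str.replace rescans of the whole evolving string by a single str.translate pass with a precomputed character table, and replaces A's string-building pad/truncate loops by list operations: ['*']*(5-n)+words for padding and one join-strip-split of words[:5] for truncation.
import Mathlib
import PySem

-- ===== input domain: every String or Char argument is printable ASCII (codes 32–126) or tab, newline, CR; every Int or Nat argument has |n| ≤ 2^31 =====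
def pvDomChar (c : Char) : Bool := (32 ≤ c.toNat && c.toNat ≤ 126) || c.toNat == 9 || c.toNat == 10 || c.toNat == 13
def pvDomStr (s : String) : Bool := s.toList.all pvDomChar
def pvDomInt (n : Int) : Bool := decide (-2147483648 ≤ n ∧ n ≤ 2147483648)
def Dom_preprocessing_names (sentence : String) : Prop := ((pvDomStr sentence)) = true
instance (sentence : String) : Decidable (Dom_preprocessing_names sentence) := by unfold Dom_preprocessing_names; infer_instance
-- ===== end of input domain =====

-- B tokenizes in one pass over the characters (instead of A's per-character str.replace
-- rescans of the evolving string) and pads/truncates by list operations; measurably faster.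


-- ===== PORT A =====

-- str.replace(old, new, 1) for a single-character old (PySem.Chars.replace has no count
-- parameter): replaces the first occurrence only; exact for single-char old.
def pvReplaceFirst : List Char → Char → List Char → List Char
  | [], _, _ => []
  | c :: rest, old, new =>
    if c = old then new ++ rest else c :: pvReplaceFirst rest old new

-- one iteration of participle's for-loop body (ch is a character of the ORIGINAL name;
-- Python's `for ch in name` iterates the string object captured at loop entry)
def pvStepA (name : List Char) (ch : Char) : List Char :=
  if PySem.Chars.isupper ch then
    pvReplaceFirst name ch [' ', PySem.Chars.lowerChar ch]
  else if ch = '_' ∨ ch = '$' then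
    pvReplaceFirst name ch [' ']
  else if PySem.Chars.isdigit ch then
    PySem.Chars.replace name [ch] [' ', ch]
  else name

def pvParticiple (name : List Char) : List (List Char) :=
  let name' := name.foldl pvStepA name
  let name1 := PySem.Chars.splitOn (PySem.Chars.strip name') [' ']
  name1.foldl (fun sentence word => if word ≠ [] then sentence ++ [word] else sentence) []

-- the num>5 join loop with the num1 countdown and the break
def pvJoin5 : List (List Char) → Int → List Char → List Char
  | [], _, acc => acc
  | w :: rest, num1, acc =>
    let acc' := if num1 = 5 then acc ++ w else acc ++ ' ' :: w
    if num1 - 1 = 0 then acc' else pvJoin5 rest (num1 - 1) acc'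

def preprocessing_names (sentence : String) : List String :=
  let s := pvParticiple sentence.toList
  let num := s.length
  if num < 5 then
    let s1 := (List.range (5 - num)).foldl (fun acc _ => acc ++ ['*', ' ']) []
    ((PySem.Chars.splitOn (PySem.Chars.strip s1) [' ']) ++ s).map String.ofList
  else if num > 5 then
    (PySem.Chars.splitOn (PySem.Chars.strip (pvJoin5 s 5 [])) [' ']).map String.ofList
  else
    s.map String.ofList

-- ===== PORT B =====

-- per-character transform applied by Source B's translation table (exact for the ASCII
-- characters of the domain: the table maps A-Z, '_', '$' and digits; others pass through)
def pvTransB (c : Char) : List Char :=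
  if PySem.Chars.isupper c then [' ', PySem.Chars.lowerChar c]
  else if c = '_' ∨ c = '$' then [' ']
  else if PySem.Chars.isdigit c then [' ', c]
  else [c]

def preprocessing_names_alt (sentence : String) : List String :=
  let words := (PySem.Chars.splitOn
      (PySem.Chars.strip (sentence.toList.flatMap pvTransB)) [' ']).filter (· ≠ [])
  let n := words.length
  if n < 5 then (List.replicate (5 - n) ['*'] ++ words).map String.ofList
  else if n > 5 then
    (PySem.Chars.splitOn (PySem.Chars.strip
      (List.intercalate [' '] (words.take 5))) [' ']).map String.ofList
  else words.map String.ofList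

-- ===== PRECONDITION & SPEC =====
def Spec_preprocessing_names (sentence : String) (out : List String) : Prop := out = preprocessing_names_alt sentence
instance (sentence : String) (out : List String) : Decidable (Spec_preprocessing_names sentence out) := by unfold Spec_preprocessing_names; infer_instance

-- ===== CLAIM (what is proved, stated in full; the proofs are below) =====
def Claim_equal_preprocessing_names : Prop := ∀ (sentence : String), Dom_preprocessing_names sentence → Spec_preprocessing_names sentence (preprocessing_names sentence)

-- ===== LEMMAS AND PROOFS =====

def pvMySplit : List Char → List (List Char)
  | [] => [[]]
  | c :: r => if c = ' ' then [] :: pvMySplit r else (pvMySplit r).modifyHead (c :: ·)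

theorem pvMySplit_ne_nil (s : List Char) : pvMySplit s ≠ [] := by
  induction s with
  | nil => simp [pvMySplit]
  | cons c r ih =>
    simp only [pvMySplit]
    split
    · simp
    · cases h : pvMySplit r with
      | nil => exact absurd h ih
      | cons a b => simp [List.modifyHead]

theorem pv_go_split (fuel : Nat) : ∀ (l cur : List Char) (acc : List (List Char)),
    l.length < fuel →
    PySem.Chars.splitOn.go [' '] fuel l cur acc
      = acc.reverse ++ (pvMySplit l).modifyHead (cur.reverse ++ ·) := by
  induction fuel with
  | zero => intro l cur acc h; exact absurd h (by omega)
  | succ f ih =>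
    intro l cur acc h
    cases l with
    | nil =>
      simp [PySem.Chars.splitOn.go, pvMySplit]
    | cons c rest =>
      rw [PySem.Chars.splitOn.go]
      by_cases hc : c = ' '
      · subst hc
        have hp : [' '].isPrefixOf (' ' :: rest) = true := by simp [List.isPrefixOf]
        rw [if_pos hp]
        simp only [List.length_cons, List.drop_succ_cons, List.length_nil, List.drop_zero, List.drop_zero]
        rw [ih rest [] _ (by simpa using Nat.lt_of_succ_lt_succ h)]
        simp [pvMySplit, List.modifyHead_id, List.modifyHead]
        cases pvMySplit rest <;> rfl
      · have hp : [' '].isPrefixOf (c :: rest) = false := by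
          simp [List.isPrefixOf]
          exact fun h' => absurd h'.symm hc
        rw [if_neg (by simp [hp])]
        rw [ih rest (c :: cur) acc (by simpa using Nat.lt_of_succ_lt_succ h)]
        simp only [pvMySplit, if_neg hc, List.reverse_cons]
        congr 1
        cases hms : pvMySplit rest with
        | nil => exact absurd hms (pvMySplit_ne_nil rest)
        | cons hd tl => simp [List.modifyHead]

theorem pv_splitOn_space (s : List Char) :
    PySem.Chars.splitOn s [' '] = pvMySplit s := by
  rw [PySem.Chars.splitOn, pv_go_split (s.length+1) s [] [] (by omega)]
  cases hms : pvMySplit s with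
  | nil => exact absurd hms (pvMySplit_ne_nil s)
  | cons hd tl => simp [List.modifyHead]

theorem pv_go_replace (c : Char) (w : List Char) (fuel : Nat) :
    ∀ (l acc : List Char), l.length ≤ fuel →
    PySem.Chars.replace.go [c] w fuel l acc
      = acc.reverse ++ l.flatMap (fun x => if x = c then w else [x]) := by
  induction fuel with
  | zero =>
    intro l acc h
    have : l = [] := List.length_eq_zero_iff.mp (Nat.le_zero.mp h)
    subst this
    simp [PySem.Chars.replace.go]
  | succ f ih =>
    intro l acc h
    cases l with
    | nil => simp [PySem.Chars.replace.go]
    | cons a rest =>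
      rw [PySem.Chars.replace.go]
      by_cases hc : a = c
      · subst hc
        have hp : [a].isPrefixOf (a :: rest) = true := by simp [List.isPrefixOf]
        rw [if_pos hp]
        simp only [List.length_cons, List.drop_succ_cons, List.length_nil, List.drop_zero]
        rw [ih rest _ (by simpa using Nat.le_of_succ_le_succ h)]
        simp
      · have hp : [c].isPrefixOf (a :: rest) = false := by
          simp [List.isPrefixOf]
          exact fun h' => absurd h'.symm hc
        rw [if_neg (by simp [hp])]
        rw [ih rest _ (by simpa using Nat.le_of_succ_le_succ h)]
        simp [hc]

theorem pv_replace_single (s : List Char) (c : Char) (w : List Char) :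
    PySem.Chars.replace s [c] w = s.flatMap (fun x => if x = c then w else [x]) := by
  rw [PySem.Chars.replace]
  rw [if_neg (by simp)]
  exact pv_go_replace c w s.length s [] le_rfl

theorem pvMySplit_append_space (u v : List Char) :
    pvMySplit (u ++ ' ' :: v) = pvMySplit u ++ pvMySplit v := by
  induction u with
  | nil => simp [pvMySplit]
  | cons c u' ih =>
    by_cases hc : c = ' '
    · subst hc; simp [pvMySplit, ih]
    · simp only [List.cons_append, pvMySplit, if_neg hc, ih]
      cases hms : pvMySplit u' with
      | nil => exact absurd hms (pvMySplit_ne_nil u')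
      | cons hd tl => simp [List.modifyHead]

def pvTok (s : List Char) : List (List Char) :=
  (pvMySplit (PySem.Chars.strip s)).filter (· ≠ [])

theorem pv_tok_eq (s : List Char) :
    (PySem.Chars.splitOn (PySem.Chars.strip s) [' ']).filter (· ≠ []) = pvTok s := by
  rw [pv_splitOn_space]; rfl

theorem pv_filter_rep (m : Nat) (y : List Char) :
    (pvMySplit (List.replicate m ' ' ++ y)).filter (· ≠ [])
      = (pvMySplit y).filter (· ≠ []) := by
  induction m with
  | zero => simp
  | succ k ih =>
    simp only [List.replicate_succ, List.cons_append, pvMySplit, reduceIte]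
    rw [List.filter_cons_of_neg (by simp)]
    exact ih

theorem pv_filter_mid (x y : List Char) (m : Nat) (hm : 1 ≤ m) :
    (pvMySplit (x ++ List.replicate m ' ' ++ y)).filter (· ≠ [])
      = (pvMySplit (x ++ ' ' :: y)).filter (· ≠ []) := by
  obtain ⟨k, rfl⟩ : ∃ k, m = k + 1 := ⟨m - 1, by omega⟩
  rw [List.replicate_succ]
  have h1 : x ++ (' ' :: List.replicate k ' ') ++ y = x ++ ' ' :: (List.replicate k ' ' ++ y) := by
    simp
  rw [h1, pvMySplit_append_space, pvMySplit_append_space, List.filter_append,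
    List.filter_append, pv_filter_rep]

theorem pv_dropWhile_rep (m : Nat) (y : List Char) :
    List.dropWhile PySem.Chars.isspace (List.replicate m ' ' ++ y)
      = List.dropWhile PySem.Chars.isspace y := by
  induction m with
  | zero => simp
  | succ k ih => simpa [List.replicate_succ, List.dropWhile_cons,
      (by decide : PySem.Chars.isspace ' ' = true)] using ih

theorem pv_tok_mid (x y : List Char) (m : Nat) (hm : 1 ≤ m) :
    pvTok (x ++ List.replicate m ' ' ++ y) = pvTok (x ++ ' ' :: y) := by
  have hy1 : x ++ ' ' :: y = x ++ List.replicate 1 ' ' ++ y := by simp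
  rw [hy1]
  unfold pvTok PySem.Chars.strip PySem.Chars.lstrip PySem.Chars.rstrip
  by_cases hx : List.dropWhile PySem.Chars.isspace x = []
  · have e : ∀ k : Nat, List.dropWhile PySem.Chars.isspace (x ++ List.replicate k ' ' ++ y)
        = List.dropWhile PySem.Chars.isspace y := by
      intro k
      rw [List.append_assoc, List.dropWhile_append, hx]
      simp [pv_dropWhile_rep]
    rw [e m, e 1]
  · have e : ∀ k : Nat, List.dropWhile PySem.Chars.isspace (x ++ List.replicate k ' ' ++ y)
        = List.dropWhile PySem.Chars.isspace x ++ (List.replicate k ' ' ++ y) := by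
      intro k
      rw [List.append_assoc, List.dropWhile_append]
      simp [List.isEmpty_iff, hx]
    rw [e m, e 1]
    set X := List.dropWhile PySem.Chars.isspace x with hX
    have hrev : ∀ k : Nat, (X ++ (List.replicate k ' ' ++ y)).reverse
        = y.reverse ++ List.replicate k ' ' ++ X.reverse := by
      intro k; simp [List.reverse_replicate]
    rw [hrev m, hrev 1]
    by_cases hyr : List.dropWhile PySem.Chars.isspace y.reverse = []
    · have f : ∀ k : Nat, List.dropWhile PySem.Chars.isspace
          (y.reverse ++ List.replicate k ' ' ++ X.reverse)
          = List.dropWhile PySem.Chars.isspace X.reverse := by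
        intro k
        rw [List.append_assoc, List.dropWhile_append, hyr]
        simp [pv_dropWhile_rep]
      rw [f m, f 1]
    · have f : ∀ k : Nat, List.dropWhile PySem.Chars.isspace
          (y.reverse ++ List.replicate k ' ' ++ X.reverse)
          = List.dropWhile PySem.Chars.isspace y.reverse ++ (List.replicate k ' ' ++ X.reverse) := by
        intro k
        rw [List.append_assoc, List.dropWhile_append]
        simp [List.isEmpty_iff, hyr]
      rw [f m, f 1]
      set Y := List.dropWhile PySem.Chars.isspace y.reverse with hY
      have hrev2 : ∀ k : Nat, (Y ++ (List.replicate k ' ' ++ X.reverse)).reverse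
          = X ++ List.replicate k ' ' ++ Y.reverse := by
        intro k; simp [List.reverse_replicate]
      rw [hrev2 m, hrev2 1]
      rw [pv_filter_mid _ _ m hm, pv_filter_mid _ _ 1 le_rfl]

theorem pv_isupper_iff (c : Char) : PySem.Chars.isupper c = true ↔ 65 ≤ c.toNat ∧ c.toNat ≤ 90 := by
  simp [PySem.Chars.isupper, Char.le_def]; exact Eq.to_iff rfl
theorem pv_isdigit_iff (c : Char) : PySem.Chars.isdigit c = true ↔ 48 ≤ c.toNat ∧ c.toNat ≤ 57 := by
  simp [PySem.Chars.isdigit, Char.le_def]; exact Eq.to_iff rfl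
theorem pv_lower_toNat (c : Char) (h : PySem.Chars.isupper c = true) :
    (PySem.Chars.lowerChar c).toNat = c.toNat + 32 := by
  have hr := (pv_isupper_iff c).mp h
  simp [PySem.Chars.lowerChar, h]
  rw [Char.toNat_ofNat]
  rw [if_pos (by constructor; omega)]

-- char ≠ facts via toNat
theorem pv_char_ne_of_toNat {a b : Char} (h : a.toNat ≠ b.toNat) : a ≠ b := by
  intro he; exact h (by rw [he])

theorem pv_replaceFirst_notin (p s new : List Char) (c : Char) (h : ∀ x ∈ p, x ≠ c) :
    pvReplaceFirst (p ++ c :: s) c new = p ++ (new ++ s) := by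
  induction p with
  | nil => simp [pvReplaceFirst]
  | cons a p' ih =>
    simp only [List.cons_append, pvReplaceFirst, if_neg (h a (by simp))]
    rw [ih (fun x hx => h x (by simp [hx]))]

def pvDoneP (done : List Char) (c : Char) : List Char :=
  if PySem.Chars.isupper c then [' ', PySem.Chars.lowerChar c]
  else if c = '_' ∨ c = '$' then [' ']
  else if PySem.Chars.isdigit c then List.replicate (done.count c) ' ' ++ [c]
  else [c]

def pvPendP (done : List Char) (c : Char) : List Char :=
  if PySem.Chars.isdigit c then List.replicate (done.count c) ' ' ++ [c] else [c]

def pvState (done rest : List Char) : List Char :=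
  done.flatMap (pvDoneP done) ++ rest.flatMap (pvPendP done)

theorem pv_flatMap_mem_congr {α β : Type} (l : List α) (f g : α → List β)
    (h : ∀ x ∈ l, f x = g x) : l.flatMap f = l.flatMap g := by
  induction l with
  | nil => rfl
  | cons a t ih => simp [List.flatMap_cons, h a (by simp), ih (fun x hx => h x (by simp [hx]))]

-- characters occurring in a done-piece: space, lowercase 97..122, digit d itself, or a plain char
theorem pv_mem_doneP (done : List Char) (d x : Char) (hx : x ∈ pvDoneP done d) :
    x = ' ' ∨ (97 ≤ x.toNat ∧ x.toNat ≤ 122)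
      ∨ (PySem.Chars.isdigit d = true ∧ x = d)
      ∨ (PySem.Chars.isupper d = false ∧ d ≠ '_' ∧ d ≠ '$' ∧ PySem.Chars.isdigit d = false ∧ x = d) := by
  unfold pvDoneP at hx
  by_cases hu : PySem.Chars.isupper d = true
  · rw [if_pos hu] at hx
    rcases List.mem_cons.mp hx with h | h
    · exact Or.inl h
    · refine Or.inr (Or.inl ?_)
      have := pv_lower_toNat d hu
      have hr := (pv_isupper_iff d).mp hu
      simp at h; subst h; omega
  · rw [if_neg hu] at hx
    by_cases hus : d = '_' ∨ d = '$'
    · rw [if_pos hus] at hx; simp at hx; exact Or.inl hx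
    · rw [if_neg hus] at hx
      by_cases hd : PySem.Chars.isdigit d = true
      · rw [if_pos hd] at hx
        rcases List.mem_append.mp hx with h | h
        · exact Or.inl (List.eq_of_mem_replicate h)
        · simp at h; exact Or.inr (Or.inr (Or.inl ⟨hd, h⟩))
      · rw [if_neg hd] at hx; simp at hx
        exact Or.inr (Or.inr (Or.inr ⟨by simpa using hu, fun h => hus (Or.inl h),
          fun h => hus (Or.inr h), by simpa using hd, hx⟩))

def pvSub (c : Char) (w : List Char) (x : Char) : List Char := if x = c then w else [x]

theorem pv_flatMap_sub_none (p : List Char) (c : Char) (w : List Char)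
    (h : ∀ x ∈ p, x ≠ c) : p.flatMap (pvSub c w) = p := by
  induction p with
  | nil => rfl
  | cons a t ih =>
    simp only [List.flatMap_cons, pvSub, if_neg (h a (by simp))]
    rw [ih (fun x hx => h x (by simp [hx]))]
    rfl

theorem pv_notin_done_upper (done : List Char) (c : Char) (hu : PySem.Chars.isupper c = true) :
    ∀ x ∈ done.flatMap (pvDoneP done), x ≠ c := by
  intro x hx
  obtain ⟨d, _, hxm⟩ := List.mem_flatMap.mp hx
  have hc := (pv_isupper_iff c).mp hu
  rcases pv_mem_doneP done d x hxm with h | h | ⟨hd, h⟩ | ⟨hnu, _, _, _, h⟩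
  · subst h; exact pv_char_ne_of_toNat (by have h32 : (' ':Char).toNat = 32 := rfl; omega)
  · exact pv_char_ne_of_toNat (by omega)
  · subst h; have := (pv_isdigit_iff x).mp hd; exact pv_char_ne_of_toNat (by omega)
  · subst h; intro he; rw [he] at hnu; rw [hnu] at hu; exact Bool.false_ne_true hu

theorem pv_notin_done_us (done : List Char) (c : Char) (hc : c = '_' ∨ c = '$') :
    ∀ x ∈ done.flatMap (pvDoneP done), x ≠ c := by
  intro x hx
  obtain ⟨d, _, hxm⟩ := List.mem_flatMap.mp hx
  have hcn : c.toNat = 95 ∨ c.toNat = 36 := by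
    rcases hc with h | h <;> subst h <;> [left; right] <;> rfl
  rcases pv_mem_doneP done d x hxm with h | h | ⟨hd, h⟩ | ⟨_, h1, h2, _, h⟩
  · subst h; exact pv_char_ne_of_toNat (by have h32 : (' ':Char).toNat = 32 := rfl; omega)
  · exact pv_char_ne_of_toNat (by omega)
  · subst h; have := (pv_isdigit_iff x).mp hd; exact pv_char_ne_of_toNat (by omega)
  · subst h; intro he; rcases hc with h | h <;> subst h
    · exact h1 he
    · exact h2 he

theorem pv_doneP_snoc_ne (done : List Char) (c d : Char) (h : PySem.Chars.isdigit c = false) :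
    pvDoneP (done ++ [c]) d = pvDoneP done d := by
  unfold pvDoneP
  by_cases h1 : PySem.Chars.isupper d = true
  · simp [h1]
  · by_cases h2 : d = '_' ∨ d = '$'
    · simp [h1, h2]
    · by_cases h3 : PySem.Chars.isdigit d = true
      · have hne : c ≠ d := fun he => by rw [he] at h; rw [h] at h3; exact Bool.false_ne_true h3
        simp [h1, h2, h3, List.count_append, List.count_singleton, hne]
      · simp [h1, h2, h3]

theorem pv_pendP_snoc_ne (done : List Char) (c d : Char) (h : PySem.Chars.isdigit c = false) :
    pvPendP (done ++ [c]) d = pvPendP done d := by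
  unfold pvPendP
  by_cases h3 : PySem.Chars.isdigit d = true
  · have hne : c ≠ d := fun he => by rw [he] at h; rw [h] at h3; exact Bool.false_ne_true h3
    simp [h3, List.count_append, List.count_singleton, hne]
  · simp [h3]

theorem pv_rep_snoc (k : Nat) (c : Char) (z : List Char) :
    List.replicate k ' ' ++ ' ' :: z = List.replicate (k + 1) ' ' ++ z := by
  rw [List.replicate_succ']
  simp

theorem pv_doneP_subst (done : List Char) (c d : Char) (hd : PySem.Chars.isdigit c = true) :
    (pvDoneP done d).flatMap (pvSub c [' ', c]) = pvDoneP (done ++ [c]) d := by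
  have hcd := (pv_isdigit_iff c).mp hd
  by_cases h1 : PySem.Chars.isupper d = true
  · rw [pv_flatMap_sub_none]
    · unfold pvDoneP; simp [h1]
    · intro x hx
      rcases pv_mem_doneP done d x hx with h | h | ⟨hdd, h⟩ | ⟨hnu, _, _, _, h⟩
      · subst h; exact pv_char_ne_of_toNat (by have h32 : (' ':Char).toNat = 32 := rfl; omega)
      · exact pv_char_ne_of_toNat (by omega)
      · unfold pvDoneP at hx; rw [if_pos h1] at hx
        simp at hx
        rcases hx with h' | h'
        · subst h'; exact pv_char_ne_of_toNat (by have h32 : (' ':Char).toNat = 32 := rfl; omega)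
        · subst h'
          have := pv_lower_toNat d h1
          have := (pv_isupper_iff d).mp h1
          exact pv_char_ne_of_toNat (by omega)
      · exact absurd h1 (by simp [hnu])
  · by_cases h2 : d = '_' ∨ d = '$'
    · rw [pv_flatMap_sub_none]
      · unfold pvDoneP; simp [h1, h2]
      · intro x hx
        unfold pvDoneP at hx; rw [if_neg (by simp [h1]), if_pos h2] at hx
        simp at hx; subst hx
        exact pv_char_ne_of_toNat (by have h32 : (' ':Char).toNat = 32 := rfl; omega)
    · by_cases h3 : PySem.Chars.isdigit d = true
      · unfold pvDoneP
        rw [if_neg (by simp [h1]), if_neg h2, if_pos h3,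
            if_neg (by simp [h1]), if_neg h2, if_pos h3]
        by_cases hdc : d = c
        · subst hdc
          rw [List.flatMap_append]
          rw [pv_flatMap_sub_none _ _ _ (fun x hx => by
            have := List.eq_of_mem_replicate hx; subst this
            exact pv_char_ne_of_toNat (by have h32 : (' ':Char).toNat = 32 := rfl; omega))]
          simp only [List.flatMap_cons, pvSub, if_pos rfl, List.flatMap_nil, List.append_nil]
          rw [List.count_append, List.count_singleton]
          simpa using pv_rep_snoc (done.count d) d [d]
        · rw [pv_flatMap_sub_none]
          · rw [List.count_append]
            have h0 : List.count d [c] = 0 := by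
              have hbe : (d == c) = false := by simpa using hdc
              simp [List.count_singleton, hbe]
              exact fun h => absurd h.symm hdc
            rw [h0, Nat.add_zero]
          · intro x hx
            rcases List.mem_append.mp hx with h | h
            · have := List.eq_of_mem_replicate h; subst this
              exact pv_char_ne_of_toNat (by have h32 : (' ':Char).toNat = 32 := rfl; omega)
            · simp at h; subst h; exact hdc
      · rw [pv_flatMap_sub_none]
        · unfold pvDoneP; simp [h1, h2, h3]
        · intro x hx
          unfold pvDoneP at hx
          rw [if_neg (by simp [h1]), if_neg h2, if_neg h3] at hx
          simp at hx; subst hx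
          intro he; rw [he, hd] at h3; simp at h3

theorem pv_pendP_subst (done : List Char) (c d : Char) (hd : PySem.Chars.isdigit c = true) :
    (pvPendP done d).flatMap (pvSub c [' ', c]) = pvPendP (done ++ [c]) d := by
  have hcd := (pv_isdigit_iff c).mp hd
  unfold pvPendP
  by_cases h3 : PySem.Chars.isdigit d = true
  · rw [if_pos h3, if_pos h3]
    by_cases hdc : d = c
    · subst hdc
      rw [List.flatMap_append]
      rw [pv_flatMap_sub_none _ _ _ (fun x hx => by
        have := List.eq_of_mem_replicate hx; subst this
        exact pv_char_ne_of_toNat (by have h32 : (' ':Char).toNat = 32 := rfl; omega))]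
      simp only [List.flatMap_cons, pvSub, reduceIte, List.flatMap_nil, List.append_nil]
      rw [List.count_append, List.count_singleton]
      simpa using pv_rep_snoc (done.count d) d [d]
    · rw [pv_flatMap_sub_none]
      · rw [List.count_append]
        have h0 : List.count d [c] = 0 := by
          have hbe : (d == c) = false := by simpa using hdc
          simp [List.count_singleton, hbe]
          exact fun h => absurd h.symm hdc
        rw [h0, Nat.add_zero]
      · intro x hx
        rcases List.mem_append.mp hx with h | h
        · have := List.eq_of_mem_replicate h; subst this
          exact pv_char_ne_of_toNat (by have h32 : (' ':Char).toNat = 32 := rfl; omega)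
        · simp at h; subst h; exact hdc
  · rw [if_neg h3, if_neg h3]
    rw [pv_flatMap_sub_none]
    intro x hx; simp at hx; subst hx
    intro he; rw [he, hd] at h3; simp at h3

theorem pv_state_cons (done rest : List Char) (c : Char) :
    pvState done (c :: rest)
      = done.flatMap (pvDoneP done) ++ (pvPendP done c ++ rest.flatMap (pvPendP done)) := by
  unfold pvState; rw [List.flatMap_cons]

theorem pv_state_snoc (done rest : List Char) (c : Char) :
    pvState (done ++ [c]) rest
      = done.flatMap (pvDoneP (done ++ [c]))
        ++ (pvDoneP (done ++ [c]) c ++ rest.flatMap (pvPendP (done ++ [c]))) := by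
  unfold pvState; rw [List.flatMap_append]; simp [List.flatMap_cons]

theorem pv_step (done rest : List Char) (c : Char) :
    pvStepA (pvState done (c :: rest)) c = pvState (done ++ [c]) rest := by
  unfold pvStepA
  by_cases hu : PySem.Chars.isupper c = true
  · rw [if_pos hu, pv_state_cons]
    have hcd := (pv_isupper_iff c).mp hu
    have hnd : PySem.Chars.isdigit c = false := by
      rw [← Bool.not_eq_true]; rw [pv_isdigit_iff]; omega
    have hpend : pvPendP done c = [c] := by unfold pvPendP; simp [hnd]
    rw [hpend]
    have := pv_replaceFirst_notin (done.flatMap (pvDoneP done))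
      (rest.flatMap (pvPendP done)) [' ', PySem.Chars.lowerChar c] c
      (pv_notin_done_upper done c hu)
    simp only [List.singleton_append] at this ⊢
    rw [this, pv_state_snoc]
    rw [pv_flatMap_mem_congr _ _ _ (fun d _ => pv_doneP_snoc_ne done c d hnd)]
    rw [pv_flatMap_mem_congr _ _ _ (fun d _ => pv_pendP_snoc_ne done c d hnd)]
    have hdp : pvDoneP (done ++ [c]) c = [' ', PySem.Chars.lowerChar c] := by
      unfold pvDoneP; simp [hu]
    rw [hdp]
  · rw [if_neg hu]
    by_cases hus : c = '_' ∨ c = '$'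
    · rw [if_pos hus, pv_state_cons]
      have hnd : PySem.Chars.isdigit c = false := by
        rw [← Bool.not_eq_true, pv_isdigit_iff]
        rcases hus with h | h <;> subst h <;> simp [Char.toNat] <;> omega
      have hpend : pvPendP done c = [c] := by unfold pvPendP; simp [hnd]
      rw [hpend]
      have := pv_replaceFirst_notin (done.flatMap (pvDoneP done))
        (rest.flatMap (pvPendP done)) [' '] c (pv_notin_done_us done c hus)
      simp only [List.singleton_append] at this ⊢
      rw [this, pv_state_snoc]
      rw [pv_flatMap_mem_congr _ _ _ (fun d _ => pv_doneP_snoc_ne done c d hnd)]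
      rw [pv_flatMap_mem_congr _ _ _ (fun d _ => pv_pendP_snoc_ne done c d hnd)]
      have hdp : pvDoneP (done ++ [c]) c = [' '] := by
        unfold pvDoneP; simp [hu, hus]
      rw [hdp]
      simp
    · rw [if_neg hus]
      by_cases hd : PySem.Chars.isdigit c = true
      · rw [if_pos hd]
        rw [pv_replace_single]
        have hsub : (fun x => if x = c then [' ', c] else [x]) = pvSub c [' ', c] := rfl
        rw [hsub, pv_state_cons, List.flatMap_append, List.flatMap_append]
        rw [List.flatMap_assoc, List.flatMap_assoc]
        rw [pv_flatMap_mem_congr _ _ _ (fun d _ => pv_doneP_subst done c d hd)]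
        rw [pv_flatMap_mem_congr _ _ _ (fun d _ => pv_pendP_subst done c d hd)]
        rw [pv_state_snoc]
        have hdp : pvDoneP (done ++ [c]) c = pvPendP (done ++ [c]) c := by
          unfold pvDoneP pvPendP
          rw [if_neg (by simp [hu]), if_neg hus, if_pos hd]
          try rfl
        rw [hdp, ← pv_pendP_subst done c c hd]
      · rw [if_neg hd, pv_state_cons, pv_state_snoc]
        have hnd : PySem.Chars.isdigit c = false := by simpa using hd
        rw [pv_flatMap_mem_congr _ _ _ (fun d _ => pv_doneP_snoc_ne done c d hnd)]
        rw [pv_flatMap_mem_congr _ _ _ (fun d _ => pv_pendP_snoc_ne done c d hnd)]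
        have hdp : pvDoneP (done ++ [c]) c = [c] := by
          unfold pvDoneP; rw [if_neg (by simp [hu]), if_neg hus, if_neg hd]
        have hpe : pvPendP done c = [c] := by unfold pvPendP; rw [if_neg hd]
        rw [hdp, hpe]

theorem pv_inv : ∀ (rest done : List Char),
    List.foldl pvStepA (pvState done rest) rest = pvState (done ++ rest) [] := by
  intro rest
  induction rest with
  | nil => intro done; simp
  | cons c r ih =>
    intro done
    rw [List.foldl_cons, pv_step done r c, ih (done ++ [c]), List.append_assoc,
      List.singleton_append]

theorem pv_state_nil_left (l : List Char) : pvState [] l = l := by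
  unfold pvState
  simp only [List.flatMap_nil, List.nil_append]
  rw [pv_flatMap_mem_congr l _ (fun x => [x]) (fun x _ => by
    unfold pvPendP; simp)]
  exact List.flatMap_singleton' l

theorem pv_A_string (name : List Char) :
    name.foldl pvStepA name = name.flatMap (pvDoneP name) := by
  have h := pv_inv name []
  rw [pv_state_nil_left] at h
  rw [h]
  unfold pvState
  simp

theorem pv_tok_trans (full : List Char) : ∀ (l x : List Char),
    (∀ c ∈ l, PySem.Chars.isdigit c = true → 1 ≤ full.count c) →
    pvTok (x ++ l.flatMap (pvDoneP full)) = pvTok (x ++ l.flatMap pvTransB) := by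
  intro l
  induction l with
  | nil => intro x _; rfl
  | cons c l' ih =>
    intro x hl
    rw [List.flatMap_cons, List.flatMap_cons]
    by_cases hd : PySem.Chars.isdigit c = true
    · have hu : PySem.Chars.isupper c = false := by
        have := (pv_isdigit_iff c).mp hd
        rw [← Bool.not_eq_true, pv_isupper_iff]; omega
      have hus : ¬(c = '_' ∨ c = '$') := by
        have := (pv_isdigit_iff c).mp hd
        rintro (h | h) <;> subst h <;> simp [Char.toNat] at this <;> omega
      have hA : pvDoneP full c = List.replicate (full.count c) ' ' ++ [c] := by
        unfold pvDoneP; rw [if_neg (by simp [hu]), if_neg hus, if_pos hd]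
      have hB : pvTransB c = [' ', c] := by
        unfold pvTransB; rw [if_neg (by simp [hu]), if_neg hus, if_pos hd]
      rw [hA, hB]
      have hk := hl c (by simp) hd
      have e1 : x ++ ((List.replicate (full.count c) ' ' ++ [c]) ++ l'.flatMap (pvDoneP full))
          = x ++ List.replicate (full.count c) ' ' ++ ([c] ++ l'.flatMap (pvDoneP full)) := by
        simp
      have e2 : x ++ ([' ', c] ++ l'.flatMap pvTransB)
          = x ++ ' ' :: ([c] ++ l'.flatMap pvTransB) := by simp
      rw [e1, e2, pv_tok_mid _ _ _ hk]
      have e3 : x ++ ' ' :: ([c] ++ l'.flatMap (pvDoneP full))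
          = (x ++ [' ', c]) ++ l'.flatMap (pvDoneP full) := by simp
      have e4 : x ++ ' ' :: ([c] ++ l'.flatMap pvTransB)
          = (x ++ [' ', c]) ++ l'.flatMap pvTransB := by simp
      rw [e3, e4]
      exact ih (x ++ [' ', c]) (fun d hdm hdd => hl d (by simp [hdm]) hdd)
    · have heq : pvDoneP full c = pvTransB c := by
        unfold pvDoneP pvTransB
        by_cases h1 : PySem.Chars.isupper c = true
        · rw [if_pos h1, if_pos h1]
        · by_cases h2 : c = '_' ∨ c = '$'
          · rw [if_neg h1, if_neg h1, if_pos h2, if_pos h2]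
          · rw [if_neg h1, if_neg h1, if_neg h2, if_neg h2, if_neg hd, if_neg hd]
      rw [heq, ← List.append_assoc, ← List.append_assoc]
      exact ih (x ++ pvTransB c) (fun d hdm hdd => hl d (by simp [hdm]) hdd)

theorem pv_words_eq (name : List Char) :
    pvTok (name.foldl pvStepA name) = pvTok (name.flatMap pvTransB) := by
  rw [pv_A_string]
  have := pv_tok_trans name name [] (fun c hc hd => by
    rw [Nat.one_le_iff_ne_zero, Ne, ← Nat.le_zero, ← Nat.not_lt]
    intro h; exact absurd (List.count_pos_iff.mpr hc) (by omega))
  simpa using this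

theorem pv_participle_eq (name : List Char) :
    pvParticiple name = pvTok (name.flatMap pvTransB) := by
  unfold pvParticiple
  have hf := PySem.List.foldl_append_if (fun w : List Char => decide (w ≠ [])) id
    (PySem.Chars.splitOn (PySem.Chars.strip (name.foldl pvStepA name)) [' ']) []
  simp only [decide_not] at hf ⊢
  rw [show (fun (sentence : List (List Char)) (word : List Char) =>
      if word ≠ [] then sentence ++ [word] else sentence)
    = (fun acc x => if (fun w : List Char => !decide (w = [])) x = true
        then acc ++ [id x] else acc) from by funext a b; simp, hf]
  simp only [List.map_id, List.nil_append]
  rw [show (fun w : List Char => !decide (w = [])) = (fun w : List Char => decide (w ≠ [])) from by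
    funext w; simp]
  rw [pv_tok_eq, pv_words_eq]

theorem pv_join5_eq (w1 w2 w3 w4 w5 : List Char) (rest : List (List Char)) :
    pvJoin5 (w1 :: w2 :: w3 :: w4 :: w5 :: rest) 5 []
      = w1 ++ ' ' :: (w2 ++ ' ' :: (w3 ++ ' ' :: (w4 ++ ' ' :: w5))) := by
  norm_num [pvJoin5]

theorem pv_intercalate5 (w1 w2 w3 w4 w5 : List Char) :
    List.intercalate [' '] [w1, w2, w3, w4, w5]
      = w1 ++ ' ' :: (w2 ++ ' ' :: (w3 ++ ' ' :: (w4 ++ ' ' :: w5))) := by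
  simp [List.intercalate, List.intersperse]

theorem pv_join5_intercalate (W : List (List Char)) (h5 : 5 < W.length) :
    pvJoin5 W 5 [] = List.intercalate [' '] (W.take 5) := by
  obtain ⟨w1, t1, rfl⟩ : ∃ a t, W = a :: t := by
    cases W with
    | nil => simp at h5
    | cons a t => exact ⟨a, t, rfl⟩
  obtain ⟨w2, t2, rfl⟩ : ∃ a t, t1 = a :: t := by
    cases t1 with
    | nil => simp at h5
    | cons a t => exact ⟨a, t, rfl⟩
  obtain ⟨w3, t3, rfl⟩ : ∃ a t, t2 = a :: t := by
    cases t2 with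
    | nil => simp at h5
    | cons a t => exact ⟨a, t, rfl⟩
  obtain ⟨w4, t4, rfl⟩ : ∃ a t, t3 = a :: t := by
    cases t3 with
    | nil => simp at h5
    | cons a t => exact ⟨a, t, rfl⟩
  obtain ⟨w5, t5, rfl⟩ : ∃ a t, t4 = a :: t := by
    cases t4 with
    | nil => simp at h5
    | cons a t => exact ⟨a, t, rfl⟩
  rw [pv_join5_eq]
  have ht : (w1 :: w2 :: w3 :: w4 :: w5 :: t5).take 5 = [w1, w2, w3, w4, w5] := by
    simp [List.take_succ_cons]
  rw [ht, pv_intercalate5]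

theorem pv_stars_eq (k : Nat) (h1 : 1 ≤ k) (h2 : k ≤ 5) :
    PySem.Chars.splitOn (PySem.Chars.strip
        ((List.range k).foldl (fun acc _ => acc ++ ['*', ' ']) [])) [' ']
      = List.replicate k ['*'] := by
  interval_cases k <;> decide

-- ===== VERDICT (by name: the statement is the Claim_ definition above) =====
theorem preprocessing_names_spec : Claim_equal_preprocessing_names := by
  intro sentence _
  unfold Spec_preprocessing_names
  simp only [preprocessing_names, preprocessing_names_alt]
  rw [pv_participle_eq, pv_tok_eq]
  set W := pvTok (sentence.toList.flatMap pvTransB) with hWdef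
  by_cases hlt : W.length < 5
  · rw [if_pos hlt, if_pos hlt]
    rw [pv_stars_eq (5 - W.length) (by omega) (by omega)]
  · rw [if_neg hlt, if_neg hlt]
    by_cases hgt : W.length > 5
    · rw [if_pos hgt, if_pos hgt, pv_join5_intercalate W hgt]
    · rw [if_neg hgt, if_neg hgt]
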